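-- pv_equiv track=rewrite | github.com/liskos/isakovich2023 | ege23/213.py | f
-- ===== SOURCE A (Python) =====
-- def f(a, b, c):
--     if a % 2 == 1 and c % 2 == 1:
--         return 0
--     if a > b:
--         return 0
--     if a == b:
--         return 1
--     return f(a + 2, b, a) + f(a * 3, b, a) + f(a * 4, b, a)
-- ===== SOURCE B (Python) =====
-- def f(a, b, c):
--     # Levelwise forward counting: propagate path counts through a frontier dict
--     # instead of A's plain exponential recursion (memoizes merged states per level).
--     if a % 2 == 1 and c % 2 == 1:
--         return 0
--     if a > b:
--         return 0
--     total = 0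
--     frontier = {a: 1}
--     while frontier:
--         nxt = {}
--         for x, cnt in frontier.items():
--             if x == b:
--                 total += cnt
--             else:
--                 moves = [x * 4] if x % 2 == 1 else [x + 2, x * 3, x * 4]
--                 for y in moves:
--                     if y <= b:
--                         nxt[y] = nxt.get(y, 0) + cnt
--         frontier = nxt
--     return total
-- ===== Notes on version B (the rewrite author's own statement) =====
-- stated objective: faster
-- what changed: A's plain exponential recursion over all move sequences is replaced by a levelwise forward dynamic program: a frontier dict maps each reachable value to its path count, merging equal intermediate values so each value is expanded once per level instead of once per path.
-- outside the precondition, e.g. on f(-3, 5, 1): A returns 0, B returns 0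
import Mathlib
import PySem

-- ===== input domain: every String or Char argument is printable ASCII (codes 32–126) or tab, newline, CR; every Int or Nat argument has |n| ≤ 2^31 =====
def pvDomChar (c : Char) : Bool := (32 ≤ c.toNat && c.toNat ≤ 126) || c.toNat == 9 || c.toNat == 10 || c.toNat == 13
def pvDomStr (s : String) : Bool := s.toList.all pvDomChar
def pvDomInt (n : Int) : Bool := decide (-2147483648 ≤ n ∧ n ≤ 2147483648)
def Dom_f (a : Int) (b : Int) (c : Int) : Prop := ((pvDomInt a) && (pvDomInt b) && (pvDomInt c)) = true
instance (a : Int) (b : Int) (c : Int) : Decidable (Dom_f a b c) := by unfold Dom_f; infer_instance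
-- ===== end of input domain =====

-- B replaces A's plain exponential recursion by a levelwise forward frontier dict that
-- merges equal intermediate values, so each reachable value is expanded once per level.

-- ===== PORT A =====
-- A's recursion is not structurally decreasing in Lean, so it is run on a fuel
-- of (b-a).toNat+1, which is proved sufficient on Pre_f (each call raises a by ≥ 2).
def fA : Nat → Int → Int → Int → Int
  | 0, _, _, _ => 0
  | n+1, a, b, c =>
    if PySem.Int.mod a 2 == 1 && PySem.Int.mod c 2 == 1 then 0
    else if a > b then 0
    else if a == b then 1
    else fA n (a+2) b a + fA n (a*3) b a + fA n (a*4) b a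

def f (a : Int) (b : Int) (c : Int) : Int := fA ((b - a).toNat + 1) a b c

-- ===== PORT B =====
-- 'if y <= b: nxt[y] = nxt.get(y, 0) + cnt'
def insertMove (b y cnt : Int) (d : PySem.Dict Int Int) : PySem.Dict Int Int :=
  if y ≤ b then d.insert y (d.getD y 0 + cnt) else d

-- one iteration of 'for x, cnt in frontier.items()', state = (total, nxt)
def stepEntry (b : Int) (acc : Int × PySem.Dict Int Int) (p : Int × Int) :
    Int × PySem.Dict Int Int :=
  if p.1 == b then (acc.1 + p.2, acc.2)
  else
    let moves := if PySem.Int.mod p.1 2 == 1 then [p.1 * 4] else [p.1 + 2, p.1 * 3, p.1 * 4]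
    (acc.1, moves.foldl (fun d y => insertMove b y p.2 d) acc.2)

-- 'while frontier:' run on a fuel proved sufficient on Pre_f (frontier minimum grows by ≥ 2 per level)
def fAltLoop : Nat → Int → Int → PySem.Dict Int Int → Int
  | 0, _, total, _ => total
  | n+1, b, total, frontier =>
    if frontier.items = [] then total
    else
      let r := frontier.items.foldl (stepEntry b) (total, PySem.Dict.empty)
      fAltLoop n b r.1 r.2

def f_alt (a : Int) (b : Int) (c : Int) : Int :=
  if PySem.Int.mod a 2 == 1 && PySem.Int.mod c 2 == 1 then 0
  else if a > b then 0
  else fAltLoop ((b - a).toNat + 2) b 0 (PySem.Dict.empty.insert a 1)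

-- ===== PRECONDITION & SPEC =====
-- Pre_f keeps the inputs on which A's recursion terminates: for a ≤ 0 with a < b the
-- chain of even/zero children never passes b and Python A dies with RecursionError
-- (except when the a-odd/c-odd entry check fires and A returns 0 at once; B returns 0 there too).
def Pre_f (a : Int) (b : Int) (c : Int) : Prop := 1 ≤ a ∨ b ≤ a
instance (a : Int) (b : Int) (c : Int) : Decidable (Pre_f a b c) := by unfold Pre_f; infer_instance
def pvWitness_f : Int × Int × Int := (2, 30, 0)

def Spec_f (a : Int) (b : Int) (c : Int) (out : Int) : Prop := out = f_alt a b c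
instance (a : Int) (b : Int) (c : Int) (out : Int) : Decidable (Spec_f a b c out) := by unfold Spec_f; infer_instance

-- ===== CLAIM (what is proved, stated in full; the proofs are below) =====
def Claim_equal_f : Prop := ∀ (a : Int) (b : Int) (c : Int), Dom_f a b c → Pre_f a b c → Spec_f a b c (f a b c)

-- ===== LEMMAS AND PROOFS =====

-- the value A's recursion assigns to a state x (c := 0, i.e. entry parity check disabled)
def Wv (b x : Int) : Int := fA ((b - x).toNat + 1) x b 0

-- total weight carried by a frontier dict
def Sv (b : Int) (d : PySem.Dict Int Int) : Int := (d.items.map (fun p => p.2 * Wv b p.1)).sum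

lemma fA_c_zero (n : Nat) (a b c : Int) (h : ¬(a % 2 = 1 ∧ c % 2 = 1)) :
    fA n a b c = fA n a b 0 := by
  cases n with
  | zero => rfl
  | succ n =>
    have h1 : (PySem.Int.mod a 2 == 1 && PySem.Int.mod c 2 == 1) = false := by
      rw [PySem.Int.mod_eq_emod_of_pos (a := a) (by norm_num),
          PySem.Int.mod_eq_emod_of_pos (a := c) (by norm_num)]
      simp only [Bool.and_eq_false_iff, beq_eq_false_iff_ne, ne_eq]
      omega
    have h2 : (PySem.Int.mod a 2 == 1 && PySem.Int.mod (0:Int) 2 == 1) = false := by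
      rw [PySem.Int.mod_eq_emod_of_pos (a := a) (by norm_num),
          PySem.Int.mod_eq_emod_of_pos (a := (0:Int)) (by norm_num)]
      simp only [Bool.and_eq_false_iff, beq_eq_false_iff_ne, ne_eq]
      omega
    simp only [fA, h1, h2]

lemma fA_stable : ∀ n m a b c : _, 1 ≤ a → (b - a).toNat < n → (b - a).toNat < m →
    fA n a b c = fA m a b c := by
  intro n
  induction n with
  | zero => intro m a b c _ hn _; omega
  | succ n ih =>
    intro m a b c ha hn hm
    obtain ⟨m', rfl⟩ : ∃ m', m = m' + 1 := ⟨m - 1, by omega⟩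
    simp only [fA]
    split
    · rfl
    split
    · rfl
    split
    · rfl
    · rename_i hab heq
      have hab' : a < b := by
        simp only [not_lt] at hab
        simp only [beq_iff_eq] at heq
        omega
      have e1 := ih m' (a+2) b a (by omega) (by omega) (by omega)
      have e2 := ih m' (a*3) b a (by omega) (by omega) (by omega)
      have e3 := ih m' (a*4) b a (by omega) (by omega) (by omega)
      rw [e1, e2, e3]

lemma Wv_gt (b x : Int) (h : b < x) : Wv b x = 0 := by
  have : (b - x).toNat = 0 := by omega
  simp only [Wv, this, fA]
  simp [h]

lemma Wv_self (b : Int) : Wv b b = 1 := by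
  have : (b - b).toNat = 0 := by omega
  simp only [Wv, this, fA]
  simp

lemma Wv_zero_of_odd_parent (n : Nat) (b x y : Int) (hx : x % 2 = 1) (hy : y % 2 = 1) (hn : 1 ≤ n) :
    fA n y b x = 0 := by
  obtain ⟨n', rfl⟩ : ∃ n', n = n' + 1 := ⟨n - 1, by omega⟩
  have h1 : (PySem.Int.mod y 2 == 1 && PySem.Int.mod x 2 == 1) = true := by
    rw [PySem.Int.mod_eq_emod_of_pos (a := y) (by norm_num),
        PySem.Int.mod_eq_emod_of_pos (a := x) (by norm_num)]
    simp only [Bool.and_eq_true, beq_iff_eq]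
    omega
  simp only [fA, h1, if_true]

lemma Wv_rec (b x : Int) (hx : 1 ≤ x) (hxb : x < b) :
    Wv b x = if x % 2 = 1 then Wv b (x*4) else Wv b (x+2) + Wv b (x*3) + Wv b (x*4) := by
  have hk : 1 ≤ (b - x).toNat := by omega
  have hstep : Wv b x = fA ((b - x).toNat) (x+2) b x + fA ((b - x).toNat) (x*3) b x
      + fA ((b - x).toNat) (x*4) b x := by
    have hunf : Wv b x = fA ((b - x).toNat + 1) x b 0 := rfl
    rw [hunf]
    simp only [fA]
    have h2 : (PySem.Int.mod x 2 == 1 && PySem.Int.mod (0:Int) 2 == 1) = false := by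
      rw [PySem.Int.mod_eq_emod_of_pos (a := x) (by norm_num),
          PySem.Int.mod_eq_emod_of_pos (a := (0:Int)) (by norm_num)]
      simp only [Bool.and_eq_false_iff, beq_eq_false_iff_ne, ne_eq]
      omega
    have h3 : ¬ (x > b) := by omega
    have h4 : (x == b) = false := by simp only [beq_eq_false_iff_ne, ne_eq]; omega
    simp [h3, h4]
  have c4 : fA ((b - x).toNat) (x*4) b x = Wv b (x*4) := by
    rw [fA_c_zero _ _ _ _ (by omega)]
    exact fA_stable _ _ _ _ _ (by omega) (by omega) (by omega)
  by_cases hpar : x % 2 = 1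
  · have c1 : fA ((b - x).toNat) (x+2) b x = 0 :=
      Wv_zero_of_odd_parent _ _ _ _ hpar (by omega) (by omega)
    have c2 : fA ((b - x).toNat) (x*3) b x = 0 :=
      Wv_zero_of_odd_parent _ _ _ _ hpar (by omega) (by omega)
    rw [hstep, c1, c2, c4, if_pos hpar]
    ring
  · have c1 : fA ((b - x).toNat) (x+2) b x = Wv b (x+2) := by
      rw [fA_c_zero _ _ _ _ (by omega)]
      exact fA_stable _ _ _ _ _ (by omega) (by omega) (by omega)
    have c2 : fA ((b - x).toNat) (x*3) b x = Wv b (x*3) := by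
      rw [fA_c_zero _ _ _ _ (by omega)]
      exact fA_stable _ _ _ _ _ (by omega) (by omega) (by omega)
    rw [hstep, c1, c2, c4, if_neg hpar]

lemma sum_map_update (l : List Int) (hnd : l.Nodup) (y : Int) (hy : y ∈ l) (g g' : Int → Int)
    (hagree : ∀ k ∈ l, k ≠ y → g' k = g k) :
    (l.map g').sum = (l.map g).sum + (g' y - g y) := by
  induction l with
  | nil => simp at hy
  | cons h t ih =>
    simp only [List.nodup_cons] at hnd
    rcases List.mem_cons.mp hy with rfl | hyt
    · have ht : t.map g' = t.map g := by
        apply List.map_congr_left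
        intro k hk
        exact hagree k (List.mem_cons_of_mem _ hk) (fun e => hnd.1 (e ▸ hk))
      simp only [List.map_cons, List.sum_cons, ht]
      ring
    · have hh : h ≠ y := fun e => hnd.1 (e ▸ hyt)
      have := ih hnd.2 hyt (fun k hk hky => hagree k (List.mem_cons_of_mem _ hk) hky)
      simp only [List.map_cons, List.sum_cons, this,
        hagree h (List.mem_cons_self) hh]
      ring

lemma Sv_keys (b : Int) (d : PySem.Dict Int Int) (hnd : d.keys.Nodup) :
    Sv b d = (d.keys.map (fun k => d.getD k 0 * Wv b k)).sum := by
  unfold Sv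
  rw [PySem.Dict.items_eq_map_keys d hnd 0]
  simp [List.map_map, Function.comp_def]

lemma Sv_insert (b : Int) (d : PySem.Dict Int Int) (hnd : d.keys.Nodup) (y v : Int) :
    Sv b (d.insert y (d.getD y 0 + v)) = Sv b d + v * Wv b y := by
  by_cases hc : d.contains y = true
  · have hk : (d.insert y (d.getD y 0 + v)).keys = d.keys := PySem.Dict.keys_insert_of_contains _ _ hc
    have hnd' : (d.insert y (d.getD y 0 + v)).keys.Nodup := by rw [hk]; exact hnd
    rw [Sv_keys _ _ hnd', Sv_keys _ _ hnd, hk]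
    have hy : y ∈ d.keys := (PySem.Dict.contains_iff_mem_keys _ _).mp hc
    rw [sum_map_update d.keys hnd y hy _ _ ?agree]
    case agree =>
      intro k _ hky
      rw [PySem.Dict.getD_insert, if_neg hky]
    rw [PySem.Dict.getD_insert, if_pos rfl]
    ring
  · simp only [Bool.not_eq_true] at hc
    unfold Sv
    rw [PySem.Dict.items_insert_of_not_contains _ _ hc,
        PySem.Dict.getD_of_not_contains _ _ hc]
    simp only [List.map_append, List.sum_append, List.map_cons, List.map_nil, List.sum_cons,
      List.sum_nil]
    ring

lemma insertMove_nodup (b y cnt : Int) (d : PySem.Dict Int Int) (hnd : d.keys.Nodup) :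
    (insertMove b y cnt d).keys.Nodup := by
  unfold insertMove
  split
  · exact PySem.Dict.nodup_keys_insert _ _ _ hnd
  · exact hnd

lemma Sv_insertMove (b y cnt : Int) (d : PySem.Dict Int Int) (hnd : d.keys.Nodup) :
    Sv b (insertMove b y cnt d) = Sv b d + cnt * Wv b y := by
  unfold insertMove
  split
  · exact Sv_insert b d hnd y cnt
  · rename_i h
    rw [Wv_gt b y (by omega)]
    ring

lemma keys_insertMove (b y cnt : Int) (d : PySem.Dict Int Int) (k : Int)
    (hk : k ∈ (insertMove b y cnt d).keys) : k ∈ d.keys ∨ (k = y ∧ y ≤ b) := by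
  unfold insertMove at hk
  split at hk
  · rcases (PySem.Dict.mem_keys_insert _ _ _ _).mp hk with rfl | h
    · right; exact ⟨rfl, by omega⟩
    · left; exact h
  · left; exact hk

lemma step_spec (b t : Int) (m : PySem.Dict Int Int) (p : Int × Int) (hnd : m.keys.Nodup)
    (hp : p.1 ≤ b ∧ (1 ≤ p.1 ∨ p.1 = b)) :
    (stepEntry b (t, m) p).1 + Sv b (stepEntry b (t, m) p).2 = t + Sv b m + p.2 * Wv b p.1
    ∧ (stepEntry b (t, m) p).2.keys.Nodup
    ∧ ∀ k ∈ (stepEntry b (t, m) p).2.keys,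
        k ∈ m.keys ∨ (p.1 < b ∧ 1 ≤ p.1 ∧ p.1 + 2 ≤ k ∧ k ≤ b) := by
  unfold stepEntry
  by_cases hb : p.1 = b
  · simp only [hb, beq_self_eq_true, if_true]
    refine ⟨?_, hnd, ?_⟩
    · rw [Wv_self]; ring
    · intro k hk; left; exact hk
  · have hb' : (p.1 == b) = false := by simp [hb]
    have hlt : p.1 < b := by omega
    have h1 : 1 ≤ p.1 := by omega
    simp only [hb', Bool.false_eq_true, if_false]
    by_cases hpar : p.1 % 2 = 1
    · have hpb : (PySem.Int.mod p.1 2 == 1) = true := by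
        rw [PySem.Int.mod_eq_emod_of_pos (by norm_num)]
        simp [hpar]
      simp only [hpb, if_true, List.foldl_cons, List.foldl_nil]
      refine ⟨?_, insertMove_nodup _ _ _ _ hnd, ?_⟩
      · rw [Sv_insertMove _ _ _ _ hnd, Wv_rec b p.1 h1 hlt, if_pos hpar]
        ring
      · intro k hk
        rcases keys_insertMove _ _ _ _ _ hk with h | ⟨rfl, hle⟩
        · left; exact h
        · right; exact ⟨hlt, h1, by omega, hle⟩
    · have hpb : (PySem.Int.mod p.1 2 == 1) = false := by
        rw [PySem.Int.mod_eq_emod_of_pos (by norm_num)]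
        simp only [beq_eq_false_iff_ne, ne_eq]
        omega
      simp only [hpb, Bool.false_eq_true, if_false, List.foldl_cons, List.foldl_nil]
      have nd1 : (insertMove b (p.1+2) p.2 m).keys.Nodup := insertMove_nodup _ _ _ _ hnd
      have nd2 : (insertMove b (p.1*3) p.2 (insertMove b (p.1+2) p.2 m)).keys.Nodup :=
        insertMove_nodup _ _ _ _ nd1
      refine ⟨?_, insertMove_nodup _ _ _ _ nd2, ?_⟩
      · rw [Sv_insertMove _ _ _ _ nd2, Sv_insertMove _ _ _ _ nd1, Sv_insertMove _ _ _ _ hnd,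
          Wv_rec b p.1 h1 hlt, if_neg hpar]
        ring
      · intro k hk
        rcases keys_insertMove _ _ _ _ _ hk with hk | ⟨rfl, hle⟩
        · rcases keys_insertMove _ _ _ _ _ hk with hk | ⟨rfl, hle⟩
          · rcases keys_insertMove _ _ _ _ _ hk with hk | ⟨rfl, hle⟩
            · left; exact hk
            · right; exact ⟨hlt, h1, by omega, hle⟩
          · right; exact ⟨hlt, h1, by omega, hle⟩
        · right; exact ⟨hlt, h1, by omega, hle⟩

lemma fold_spec (b : Int) (l : List (Int × Int))
    (hl : ∀ p ∈ l, p.1 ≤ b ∧ (1 ≤ p.1 ∨ p.1 = b)) :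
    ∀ t m, m.keys.Nodup →
    (l.foldl (stepEntry b) (t, m)).1 + Sv b (l.foldl (stepEntry b) (t, m)).2
      = t + Sv b m + (l.map (fun p => p.2 * Wv b p.1)).sum
    ∧ (l.foldl (stepEntry b) (t, m)).2.keys.Nodup
    ∧ ∀ k ∈ (l.foldl (stepEntry b) (t, m)).2.keys,
        k ∈ m.keys ∨ ∃ p ∈ l, p.1 < b ∧ 1 ≤ p.1 ∧ p.1 + 2 ≤ k ∧ k ≤ b := by
  induction l with
  | nil => intro t m hnd; exact ⟨by simp, hnd, by simp⟩
  | cons p l ih =>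
    intro t m hnd
    have hstep := step_spec b t m p hnd (hl p (List.mem_cons_self))
    have hrest : ∀ q ∈ l, q.1 ≤ b ∧ (1 ≤ q.1 ∨ q.1 = b) :=
      fun q hq => hl q (List.mem_cons_of_mem _ hq)
    have ih' := ih hrest (stepEntry b (t, m) p).1 (stepEntry b (t, m) p).2 hstep.2.1
    simp only [List.foldl_cons]
    have hpair : stepEntry b (t, m) p
        = ((stepEntry b (t, m) p).1, (stepEntry b (t, m) p).2) := rfl
    rw [hpair] at ih' ⊢
    refine ⟨?_, ih'.2.1, ?_⟩
    · rw [ih'.1, hstep.1]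
      simp only [List.map_cons, List.sum_cons]
      ring
    · intro k hk
      rcases ih'.2.2 k hk with hk' | ⟨q, hq, hq'⟩
      · rcases hstep.2.2 k hk' with hk'' | hnew
        · left; exact hk''
        · right; exact ⟨p, List.mem_cons_self, hnew⟩
      · right; exact ⟨q, List.mem_cons_of_mem _ hq, hq'⟩

lemma keys_nil_items_nil (d : PySem.Dict Int Int) (h : d.keys = []) : d.items = [] := by
  have h2 : d.items.map Prod.fst = [] := h
  exact List.map_eq_nil_iff.mp h2

lemma loop_spec : ∀ (n : Nat) (b t : Int) (d : PySem.Dict Int Int), d.keys.Nodup →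
    (∀ k ∈ d.keys, k ≤ b ∧ (1 ≤ k ∨ k = b)) →
    (∀ k ∈ d.keys, (b - k).toNat < 2 * n) →
    fAltLoop n b t d = t + Sv b d := by
  intro n
  induction n with
  | zero =>
    intro b t d hnd hP hfuel
    have hkeys : d.keys = [] := by
      cases hk : d.keys with
      | nil => rfl
      | cons x xs => exact absurd (hfuel x (by rw [hk]; exact List.mem_cons_self)) (by omega)
    have hit : d.items = [] := keys_nil_items_nil d hkeys
    simp [fAltLoop, Sv, hit]
  | succ n ih =>
    intro b t d hnd hP hfuel
    simp only [fAltLoop]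
    split
    · rename_i hitems
      simp [Sv, hitems]
    · have hl : ∀ p ∈ d.items, p.1 ≤ b ∧ (1 ≤ p.1 ∨ p.1 = b) := by
        intro p hp
        exact hP p.1 (PySem.Dict.mem_keys_of_mem_items _ hp)
      have hfold := fold_spec b d.items hl t PySem.Dict.empty (by
        simp [PySem.Dict.keys_empty])
      have hSempty : Sv b (PySem.Dict.empty : PySem.Dict Int Int) = 0 := rfl
      set r := d.items.foldl (stepEntry b) (t, PySem.Dict.empty) with hr
      have hkeys : ∀ k ∈ r.2.keys, k ≤ b ∧ (1 ≤ k ∨ k = b) := by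
        intro k hk
        rcases hfold.2.2 k hk with h | ⟨p, _, hp⟩
        · simp [PySem.Dict.keys_empty] at h
        · exact ⟨hp.2.2.2, Or.inl (by omega)⟩
      have hfuel' : ∀ k ∈ r.2.keys, (b - k).toNat < 2 * n := by
        intro k hk
        rcases hfold.2.2 k hk with h | ⟨p, hpmem, hp⟩
        · simp [PySem.Dict.keys_empty] at h
        · have := hfuel p.1 (PySem.Dict.mem_keys_of_mem_items _ hpmem)
          omega
      rw [ih b r.1 r.2 hfold.2.1 hkeys hfuel', hfold.1, hSempty]
      simp only [Sv]
      ring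

-- ===== VERDICT (by name: the statement is the Claim_ definition above) =====
theorem f_spec : Claim_equal_f := by
  intro a b c _ hpre
  unfold Spec_f f f_alt
  by_cases hcond : (PySem.Int.mod a 2 == 1 && PySem.Int.mod c 2 == 1) = true
  · simp only [fA, hcond, if_true]
  · have hcond' : ¬(a % 2 = 1 ∧ c % 2 = 1) := by
      rw [PySem.Int.mod_eq_emod_of_pos (a := a) (by norm_num),
          PySem.Int.mod_eq_emod_of_pos (a := c) (by norm_num)] at hcond
      simp only [Bool.and_eq_true, beq_iff_eq] at hcond
      tauto
    rw [Bool.not_eq_true] at hcond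
    by_cases hab : a > b
    · simp only [fA, hcond, Bool.false_eq_true, if_false, if_pos hab]
    · have hale : a ≤ b := by omega
      simp only [hcond, Bool.false_eq_true, if_false, if_neg hab]
      have hleft : fA ((b - a).toNat + 1) a b c = Wv b a := fA_c_zero _ _ _ _ hcond'
      rw [hleft]
      have hkeys1 : (PySem.Dict.empty.insert a (1:Int)).keys = [a] := by
        rw [PySem.Dict.keys_insert_of_not_contains _ _ (by simp [PySem.Dict.contains_empty])]
        simp [PySem.Dict.keys_empty]
      have hitems1 : (PySem.Dict.empty.insert a (1:Int)).items = [(a, 1)] := by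
        rw [PySem.Dict.items_insert_of_not_contains _ _ (by simp [PySem.Dict.contains_empty])]
        rfl
      rw [loop_spec _ b 0 _ (by rw [hkeys1]; simp) ?hP ?hfuel]
      case hP =>
        intro k hk
        rw [hkeys1] at hk
        simp only [List.mem_singleton] at hk
        subst hk
        exact ⟨hale, by unfold Pre_f at hpre; omega⟩
      case hfuel =>
        intro k hk
        rw [hkeys1] at hk
        simp only [List.mem_singleton] at hk
        subst hk
        omega
      simp [Sv, hitems1]
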